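-- pv_equiv track=rewrite | github.com/stevologic/security-recipes.ai | scripts/generate_agentic_soc_detection_pack.py | workflow_namespaces
-- ===== SOURCE A (Python) =====
-- from typing import Any
--
-- def workflow_namespaces(workflow: dict[str, Any]) -> list[str]:
--     return sorted(
--         {
--             str(context.get("namespace"))
--             for context in workflow.get("mcp_context", []) or []
--             if isinstance(context, dict) and context.get("namespace")
--         }
--     )
-- ===== SOURCE B (Python) =====
-- def workflow_namespaces(workflow):
--     def insert(xs, name):
--         # insert name into sorted duplicate-free list xs, keeping it sorted and duplicate-free
--         if not xs:
--             return [name]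
--         if name < xs[0]:
--             return [name] + xs
--         if name == xs[0]:
--             return xs
--         return [xs[0]] + insert(xs[1:], name)
--
--     def go(acc, contexts):
--         if not contexts:
--             return acc
--         context, rest = contexts[0], contexts[1:]
--         if isinstance(context, dict) and context.get("namespace"):
--             acc = insert(acc, str(context.get("namespace")))
--         return go(acc, rest)
--
--     return go([], list(workflow.get("mcp_context") or []))
-- ===== Notes on version B (the rewrite author's own statement) =====
-- stated objective: alternative
-- what changed: Replaces the set-comprehension + sorted() with a recursive pass that orderedly inserts each truthy namespace into a sorted duplicate-free accumulator (insertion into sorted position instead of hash-set dedup followed by a sort).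
import Mathlib
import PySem

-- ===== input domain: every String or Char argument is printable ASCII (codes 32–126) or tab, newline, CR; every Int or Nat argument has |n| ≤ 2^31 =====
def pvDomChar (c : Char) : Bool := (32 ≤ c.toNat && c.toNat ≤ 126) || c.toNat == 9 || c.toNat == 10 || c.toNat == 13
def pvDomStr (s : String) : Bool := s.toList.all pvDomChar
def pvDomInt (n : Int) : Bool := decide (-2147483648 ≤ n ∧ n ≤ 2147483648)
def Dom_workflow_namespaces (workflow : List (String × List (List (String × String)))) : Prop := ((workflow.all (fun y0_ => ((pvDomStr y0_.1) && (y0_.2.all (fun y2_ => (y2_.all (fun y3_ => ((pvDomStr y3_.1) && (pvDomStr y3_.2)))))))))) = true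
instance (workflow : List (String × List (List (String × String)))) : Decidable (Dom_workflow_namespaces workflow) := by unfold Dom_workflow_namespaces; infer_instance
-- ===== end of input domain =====

-- B replaces A's hash-set dedup + sorted() by a recursive pass inserting each truthy
-- namespace into a sorted duplicate-free accumulator; alternative algorithm, same result.

-- ===== PORT A =====
-- set comprehension: fold over the contexts, adding each truthy namespace to a PySem.Set
def workflow_namespaces (workflow : List (String × List (List (String × String)))) : List String :=
  -- dict lookup = first match on the association list (hand port, exact for the convention)
  let ctxs0 := ((workflow.find? (fun kv => kv.1 == "mcp_context")).map Prod.snd).getD []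
  let contexts := if ctxs0 = [] then [] else ctxs0  -- '… or []'
  let s : PySem.Set String := contexts.foldl
    (fun acc context =>
      match (context.find? (fun kv => kv.1 == "namespace")).map Prod.snd with
      | some ns => if ns ≠ "" then PySem.Set.add acc ns else acc
      | none => acc)
    PySem.Set.empty
  PySem.List.sorted s (fun x => x) false

-- ===== PORT B =====
-- ordered insertion into a sorted duplicate-free list (Source B's 'insert')
def wnInsert (name : String) : List String → List String
  | [] => [name]
  | x :: xs =>
      if name < x then name :: x :: xs
      else if name = x then x :: xs
      else x :: wnInsert name xs

-- Source B's 'go': recurse over the contexts, inserting each truthy namespace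
def wnGo (acc : List String) : List (List (String × String)) → List String
  | [] => acc
  | context :: rest =>
      wnGo
        (match (context.find? (fun kv => kv.1 == "namespace")).map Prod.snd with
         | some ns => if ns ≠ "" then wnInsert ns acc else acc
         | none => acc)
        rest

def workflow_namespaces_alt (workflow : List (String × List (List (String × String)))) : List String :=
  let ctxs0 := ((workflow.find? (fun kv => kv.1 == "mcp_context")).map Prod.snd).getD []
  wnGo [] (if ctxs0 = [] then [] else ctxs0)

-- ===== PRECONDITION & SPEC =====
def Spec_workflow_namespaces (workflow : List (String × List (List (String × String)))) (out : List String) : Prop := out = workflow_namespaces_alt workflow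
instance (workflow : List (String × List (List (String × String)))) (out : List String) : Decidable (Spec_workflow_namespaces workflow out) := by unfold Spec_workflow_namespaces; infer_instance

-- ===== CLAIM (what is proved, stated in full; the proofs are below) =====
def Claim_equal_workflow_namespaces : Prop := ∀ (workflow : List (String × List (List (String × String)))), Dom_workflow_namespaces workflow → Spec_workflow_namespaces workflow (workflow_namespaces workflow)

-- ===== LEMMAS AND PROOFS =====

-- the list of truthy namespaces a context list yields, in order (proof-side abbreviation)
def wnNames : List (List (String × String)) → List String
  | [] => []
  | context :: rest =>
      (match (context.find? (fun kv => kv.1 == "namespace")).map Prod.snd with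
       | some ns => if ns ≠ "" then [ns] else []
       | none => []) ++ wnNames rest

lemma mem_wnInsert (x name : String) (l : List String) :
    x ∈ wnInsert name l ↔ x = name ∨ x ∈ l := by
  induction l with
  | nil => simp [wnInsert]
  | cons y ys ih =>
      unfold wnInsert
      split_ifs with h1 h2
      · simp
      · subst h2; simp
      · simp [ih]; tauto

lemma pairwise_wnInsert (name : String) (l : List String)
    (h : l.Pairwise (· < ·)) : (wnInsert name l).Pairwise (· < ·) := by
  induction l with
  | nil => simp [wnInsert]
  | cons y ys ih =>
      have hy := (List.pairwise_cons.mp h).1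
      have hys := (List.pairwise_cons.mp h).2
      unfold wnInsert
      split_ifs with h1 h2
      · exact List.pairwise_cons.mpr ⟨by
          intro z hz
          rcases List.mem_cons.mp hz with rfl | hz
          · exact h1
          · exact lt_trans h1 (hy z hz), h⟩
      · subst h2; exact h
      · have hyn : y < name := lt_of_le_of_ne (le_of_not_gt h1) (Ne.symm h2)
        refine List.pairwise_cons.mpr ⟨?_, ih hys⟩
        intro z hz
        rcases (mem_wnInsert z name ys).mp hz with rfl | hz
        · exact hyn
        · exact hy z hz

lemma mem_wnGo (x : String) (cs : List (List (String × String))) :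
    ∀ acc, x ∈ wnGo acc cs ↔ x ∈ acc ∨ x ∈ wnNames cs := by
  induction cs with
  | nil => intro acc; simp [wnGo, wnNames]
  | cons c cs ih =>
      intro acc
      unfold wnGo wnNames
      rw [ih]
      cases (c.find? (fun kv => kv.1 == "namespace")).map Prod.snd with
      | none => simp
      | some ns =>
          dsimp only
          split_ifs with h
          · rw [mem_wnInsert]; simp; tauto
          · simp

lemma pairwise_wnGo (cs : List (List (String × String))) :
    ∀ acc, acc.Pairwise (· < ·) → (wnGo acc cs).Pairwise (· < ·) := by
  induction cs with
  | nil => intro acc h; exact h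
  | cons c cs ih =>
      intro acc h
      unfold wnGo
      apply ih
      cases (c.find? (fun kv => kv.1 == "namespace")).map Prod.snd with
      | none => exact h
      | some ns =>
          dsimp only
          split_ifs with hns
          · exact pairwise_wnInsert ns acc h
          · exact h

-- A's set fold equals folding Set.add over the collected namespace list
lemma setFold_eq (cs : List (List (String × String))) :
    ∀ s : PySem.Set String,
      cs.foldl
        (fun acc context =>
          match (context.find? (fun kv => kv.1 == "namespace")).map Prod.snd with
          | some ns => if ns ≠ "" then PySem.Set.add acc ns else acc
          | none => acc) s
      = (wnNames cs).foldl PySem.Set.add s := by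
  induction cs with
  | nil => intro s; rfl
  | cons c cs ih =>
      intro s
      unfold wnNames
      rw [List.foldl_cons, List.foldl_append, ih]
      cases (c.find? (fun kv => kv.1 == "namespace")).map Prod.snd with
      | none => simp
      | some ns => dsimp only; split_ifs <;> simp

lemma main_aux (cs : List (List (String × String))) :
    PySem.List.sorted
      (cs.foldl
        (fun acc context =>
          match (context.find? (fun kv => kv.1 == "namespace")).map Prod.snd with
          | some ns => if ns ≠ "" then PySem.Set.add acc ns else acc
          | none => acc)
        PySem.Set.empty) (fun x => x) false
    = wnGo [] cs := by
  rw [setFold_eq]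
  have hofl : (wnNames cs).foldl PySem.Set.add PySem.Set.empty = PySem.Set.ofList (wnNames cs) := by
    rw [PySem.Set.ofList_eq_foldl]; rfl
  rw [hofl]
  have hpw : (wnGo [] cs).Pairwise (· < ·) := pairwise_wnGo cs [] (by simp)
  refine PySem.List.sorted_eq_of_perm_of_pairwise_lt _ _ (fun x => x) ?_ hpw
  refine (List.perm_ext_iff_of_nodup (hpw.imp ne_of_lt) (PySem.Set.nodup_ofList _)).mpr ?_
  intro a
  rw [mem_wnGo, PySem.Set.mem_ofList]
  simp

-- ===== VERDICT (by name: the statement is the Claim_ definition above) =====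
theorem workflow_namespaces_spec : Claim_equal_workflow_namespaces := by
  intro workflow _
  unfold Spec_workflow_namespaces workflow_namespaces workflow_namespaces_alt
  exact main_aux _
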